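-- pv_equiv track=rewrite | github.com/SpaceJ0392/coding_test | coding_masters_v2/8721_음식_배달.py | find_min_delivery_time
-- ===== SOURCE A (Python) =====
-- import itertools
--
-- def calculate_distance(x1, y1, x2, y2):
--     return abs(x1 - x2) + abs(y1 - y2)
--
-- def find_min_delivery_time(N, K, houses):
--     # 식당 A의 위치
--     start = (1, 1)
--
--     # 모든 집들의 순열 중 K개씩 조합을 생성
--     permutations = list(itertools.permutations(houses, K))
--
--     min_time = float('inf')
--
--     for perm in permutations:
--         # 현재 순열의 경로를 따라 거리를 계산
--         time = 0
--         current_pos = start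
--
--         for house in perm:
--             time += calculate_distance(current_pos[0], current_pos[1], house[0], house[1])
--             current_pos = house
--
--         # 마지막 집에서 다시 식당으로 돌아가는 거리 추가
--         time += calculate_distance(current_pos[0], current_pos[1], start[0], start[1])
--
--         # 최소 시간 갱신
--         if time < min_time:
--             min_time = time
--
--     return min_time
-- ===== SOURCE B (Python) =====
-- def calculate_distance(x1, y1, x2, y2):
--     return abs(x1 - x2) + abs(y1 - y2)
--
-- def find_min_delivery_time(N, K, houses):
--     # Recursive best-completion search: instead of materializing every
--     # K-permutation and scoring each from scratch, pick the next house
--     # recursively and accumulate the cost on the way down.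
--     def best(pos, remaining, k):
--         if k == 0:
--             return calculate_distance(pos[0], pos[1], 1, 1)
--         choices = []
--         for i in range(len(remaining)):
--             h = remaining[i]
--             rest = remaining[:i] + remaining[i + 1:]
--             choices.append(calculate_distance(pos[0], pos[1], h[0], h[1]) + best(h, rest, k - 1))
--         return min(choices)
--     return best((1, 1), list(houses), K)
-- ===== Notes on version B (the rewrite author's own statement) =====
-- stated objective: alternative
-- what changed: Replaces materializing the full list of K-permutations and re-scoring each path from scratch with a recursive best-completion search that picks the next house and accumulates the cost on the way down.
-- outside the precondition, e.g. on find_min_delivery_time(1, 2, [(0, 0)]): A returns inf, B raises ValueError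
import Mathlib
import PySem

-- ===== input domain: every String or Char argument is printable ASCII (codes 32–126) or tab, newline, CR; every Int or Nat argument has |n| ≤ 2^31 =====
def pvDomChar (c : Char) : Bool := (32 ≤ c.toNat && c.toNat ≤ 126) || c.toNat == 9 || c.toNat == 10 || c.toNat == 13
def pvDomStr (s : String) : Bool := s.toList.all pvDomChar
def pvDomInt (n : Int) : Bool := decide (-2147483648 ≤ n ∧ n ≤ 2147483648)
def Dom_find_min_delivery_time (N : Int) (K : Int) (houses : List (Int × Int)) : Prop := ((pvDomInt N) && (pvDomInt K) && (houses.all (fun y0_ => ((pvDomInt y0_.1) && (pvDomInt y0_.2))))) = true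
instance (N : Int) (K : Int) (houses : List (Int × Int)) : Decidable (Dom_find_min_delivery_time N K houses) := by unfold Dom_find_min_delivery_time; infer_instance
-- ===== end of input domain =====

-- B replaces A's materialize-all-K-permutations-then-score loop by a recursive
-- best-completion search that accumulates the path cost while choosing the next house
-- (objective: alternative decomposition, same exact result).

-- ===== PORT A =====
def calculate_distance (x1 y1 x2 y2 : Int) : Int := |x1 - x2| + |y1 - y2|

def find_min_delivery_time (N : Int) (K : Int) (houses : List (Int × Int)) : Int :=
  let permutations := PySem.List.permutations houses K.toNat
  let res := permutations.foldl (fun (min_time : Option Int) perm =>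
    let z := perm.foldl (fun (s : Int × (Int × Int)) house =>
        (s.1 + calculate_distance s.2.1 s.2.2 house.1 house.2, house)) ((0 : Int), ((1 : Int), (1 : Int)))
    let time := z.1 + calculate_distance z.2.1 z.2.2 1 1
    match min_time with
    | none => some time
    | some m => if time < m then some time else some m) none
  -- res = none exactly when A would return float('inf') (no K-permutation exists); excluded by Pre_
  match res with
  | some v => v
  | none => 0

-- ===== PORT B =====
-- best(pos, remaining, k) of Source B: recursion on k; the i-loop is the map over range
def pvBest (pos : Int × Int) (rem : List (Int × Int)) (k : Nat) : Int :=
  match k with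
  | 0 => calculate_distance pos.1 pos.2 1 1
  | k' + 1 =>
    -- choices: one candidate per index i; rem[i]? = none is unreachable (i < len(remaining))
    match PySem.List.min? ((List.range rem.length).map (fun i =>
      match rem[i]? with
      | some h => calculate_distance pos.1 pos.2 h.1 h.2 + pvBest h (rem.eraseIdx i) k'
      | none => 0)) (fun v => v) with
    | some v => v
    | none => 0  -- min([]) raises in Python; excluded by Pre_

def find_min_delivery_time_alt (N : Int) (K : Int) (houses : List (Int × Int)) : Int :=
  pvBest (1, 1) houses K.toNat

-- ===== PRECONDITION & SPEC =====
-- Pre_ excludes K < 0 (both programs raise ValueError) and K > len(houses), where A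
-- returns float('inf') — not an Int — and B raises ValueError on min([]).
def Pre_find_min_delivery_time (N : Int) (K : Int) (houses : List (Int × Int)) : Prop :=
  0 ≤ K ∧ K ≤ houses.length
instance (N : Int) (K : Int) (houses : List (Int × Int)) : Decidable (Pre_find_min_delivery_time N K houses) := by unfold Pre_find_min_delivery_time; infer_instance

def pvWitness_find_min_delivery_time : Int × Int × (List (Int × Int)) := (2, 1, [(3, 4)])

def Spec_find_min_delivery_time (N : Int) (K : Int) (houses : List (Int × Int)) (out : Int) : Prop := out = find_min_delivery_time_alt N K houses
instance (N : Int) (K : Int) (houses : List (Int × Int)) (out : Int) : Decidable (Spec_find_min_delivery_time N K houses out) := by unfold Spec_find_min_delivery_time; infer_instance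

-- ===== CLAIM (what is proved, stated in full; the proofs are below) =====
def Claim_equal_find_min_delivery_time : Prop := ∀ (N : Int) (K : Int) (houses : List (Int × Int)), Dom_find_min_delivery_time N K houses → Pre_find_min_delivery_time N K houses → Spec_find_min_delivery_time N K houses (find_min_delivery_time N K houses)

-- ===== LEMMAS AND PROOFS =====

-- cost of the closed path start → perm → start, starting from pos
def pvCost (pos : Int × Int) : List (Int × Int) → Int
  | [] => calculate_distance pos.1 pos.2 1 1
  | h :: t => calculate_distance pos.1 pos.2 h.1 h.2 + pvCost h t

-- A's inner loop computes pvCost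
lemma pvInner (perm : List (Int × Int)) : ∀ (t0 : Int) (pos : Int × Int),
    (perm.foldl (fun (s : Int × (Int × Int)) house =>
        (s.1 + calculate_distance s.2.1 s.2.2 house.1 house.2, house)) (t0, pos)).1
      + calculate_distance (perm.foldl (fun (s : Int × (Int × Int)) house =>
        (s.1 + calculate_distance s.2.1 s.2.2 house.1 house.2, house)) (t0, pos)).2.1
        (perm.foldl (fun (s : Int × (Int × Int)) house =>
        (s.1 + calculate_distance s.2.1 s.2.2 house.1 house.2, house)) (t0, pos)).2.2 1 1
      = t0 + pvCost pos perm := by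
  induction perm with
  | nil => intro t0 pos; simp [pvCost]
  | cons h t ih => intro t0 pos; simp only [List.foldl_cons]; rw [ih]; simp [pvCost]; ring

-- A's outer option-min loop on a list that already holds the times
lemma pvFoldSome (l : List Int) : ∀ (m : Int),
    l.foldl (fun (acc : Option Int) t => match acc with
      | none => some t
      | some m' => if t < m' then some t else some m') (some m) = some (l.foldl min m) := by
  induction l with
  | nil => intro m; rfl
  | cons x t ih =>
    intro m; simp only [List.foldl_cons]
    have : (if x < m then some x else some m) = some (min m x) := by
      by_cases h : x < m <;> simp [h, min_def]
    rw [this, ih]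

lemma pvMinCharacterization (l : List Int) (m : Int) :
    PySem.List.min? l (fun v => v) = some m ↔ m ∈ l ∧ ∀ y ∈ l, m ≤ y := by
  constructor
  · intro h
    exact ⟨PySem.List.min?_mem h, fun y hy => PySem.List.min?_isMin h y hy⟩
  · rintro ⟨hm, hub⟩
    have hne : l ≠ [] := by rintro rfl; simp at hm
    rcases hmo : PySem.List.min? l (fun v => v) with _ | m'
    · rw [PySem.List.min?_eq_none_iff] at hmo; exact absurd hmo hne
    · have h1 : m' ∈ l := PySem.List.min?_mem hmo
      have h2 : (fun v => v) m' ≤ (fun v => v) m := PySem.List.min?_isMin hmo m hm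
      exact congrArg some (le_antisymm (hub m' h1) h2).symm

-- named form of B's per-index candidate (definally equal to the lambda in pvBest)
def pvChoice (pos : Int × Int) (rem : List (Int × Int)) (k : Nat) (i : Nat) : Int :=
  match rem[i]? with
  | some h => calculate_distance pos.1 pos.2 h.1 h.2 + pvBest h (rem.eraseIdx i) k
  | none => 0

lemma pvBest_succ (pos : Int × Int) (rem : List (Int × Int)) (k : Nat) :
    pvBest pos rem (k + 1) =
      match PySem.List.min? ((List.range rem.length).map (pvChoice pos rem k)) (fun v => v) with
      | some v => v
      | none => 0 := rfl

lemma pvChoice_eq (pos : Int × Int) (rem : List (Int × Int)) (k : Nat) (i : Nat)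
    (hi : i < rem.length) :
    pvChoice pos rem k i
      = calculate_distance pos.1 pos.2 (rem[i]'hi).1 (rem[i]'hi).2 + pvBest (rem[i]'hi) (rem.eraseIdx i) k := by
  simp [pvChoice, List.getElem?_eq_getElem hi]

-- membership in A's candidate-cost list, one level unfolded
lemma pvMemBig (rem : List (Int × Int)) (pos : Int × Int) (k : Nat) (y : Int) :
    (y ∈ (PySem.List.permutations rem (k + 1)).map (pvCost pos)) ↔
    ∃ i, ∃ hi : i < rem.length, ∃ p ∈ PySem.List.permutations (rem.eraseIdx i) k,
      y = pvCost pos ((rem[i]'hi) :: p) := by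
  rw [PySem.List.permutations_succ, List.map_flatMap]
  simp only [List.mem_flatMap, List.mem_range]
  constructor
  · rintro ⟨i, hi, hy⟩
    rw [List.getElem?_eq_getElem hi] at hy
    simp only [List.map_map, List.mem_map, Function.comp] at hy
    obtain ⟨p, hp, rfl⟩ := hy
    exact ⟨i, hi, p, hp, rfl⟩
  · rintro ⟨i, hi, p, hp, rfl⟩
    refine ⟨i, hi, ?_⟩
    rw [List.getElem?_eq_getElem hi]
    simp only [List.map_map, List.mem_map, Function.comp]
    exact ⟨p, hp, rfl⟩

-- main lemma: the minimum of A's candidate costs is B's recursion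
lemma pvMain : ∀ (k : Nat) (rem : List (Int × Int)) (pos : Int × Int), k ≤ rem.length →
    PySem.List.min? ((PySem.List.permutations rem k).map (pvCost pos)) (fun v => v)
      = some (pvBest pos rem k) := by
  intro k
  induction k with
  | zero =>
    intro rem pos _
    show PySem.List.min? ([pvCost pos []]) (fun v => v) = _
    rw [PySem.List.min?_id_cons]
    simp [pvBest, pvCost]
  | succ k ih =>
    intro rem pos hk
    have hlen : 0 < rem.length := by omega
    have hIH : ∀ i (hi : i < rem.length),
        PySem.List.min? ((PySem.List.permutations (rem.eraseIdx i) k).map (pvCost (rem[i]'hi))) (fun v => v)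
          = some (pvBest (rem[i]'hi) (rem.eraseIdx i) k) := by
      intro i hi
      apply ih
      rw [List.length_eraseIdx]
      simp only [hi, if_true]
      omega
    obtain ⟨c, hc⟩ : ∃ c, PySem.List.min? ((List.range rem.length).map (pvChoice pos rem k)) (fun v => v) = some c := by
      rcases h : PySem.List.min? ((List.range rem.length).map (pvChoice pos rem k)) (fun v => v) with _ | c
      · rw [PySem.List.min?_eq_none_iff, List.map_eq_nil_iff, List.range_eq_nil] at h
        omega
      · exact ⟨c, rfl⟩
    have hbest : pvBest pos rem (k + 1) = c := by rw [pvBest_succ, hc]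
    obtain ⟨hcmem, hclb⟩ := (pvMinCharacterization _ _).1 hc
    rw [pvMinCharacterization]
    constructor
    · -- the optimum is the cost of some candidate path
      rw [hbest]
      simp only [List.mem_map, List.mem_range] at hcmem
      obtain ⟨i, hi, hif⟩ := hcmem
      obtain ⟨hmem', -⟩ := (pvMinCharacterization _ _).1 (hIH i hi)
      simp only [List.mem_map] at hmem'
      obtain ⟨p, hp, hpc⟩ := hmem'
      rw [pvMemBig]
      refine ⟨i, hi, p, hp, ?_⟩
      have h1 : pvCost pos ((rem[i]'hi) :: p)
          = calculate_distance pos.1 pos.2 (rem[i]'hi).1 (rem[i]'hi).2 + pvCost (rem[i]'hi) p := rfl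
      rw [h1, hpc, ← pvChoice_eq pos rem k i hi, hif]
    · -- the optimum is below every candidate cost
      intro y hy
      rw [pvMemBig] at hy
      obtain ⟨i, hi, p, hp, rfl⟩ := hy
      have h1 : c ≤ pvChoice pos rem k i :=
        hclb _ (by simp only [List.mem_map, List.mem_range]; exact ⟨i, hi, rfl⟩)
      obtain ⟨-, hlb'⟩ := (pvMinCharacterization _ _).1 (hIH i hi)
      have h2 : pvBest (rem[i]'hi) (rem.eraseIdx i) k ≤ pvCost (rem[i]'hi) p :=
        hlb' _ (List.mem_map.mpr ⟨p, hp, rfl⟩)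
      rw [hbest]
      calc c ≤ pvChoice pos rem k i := h1
        _ = calculate_distance pos.1 pos.2 (rem[i]'hi).1 (rem[i]'hi).2 + pvBest (rem[i]'hi) (rem.eraseIdx i) k := pvChoice_eq pos rem k i hi
        _ ≤ calculate_distance pos.1 pos.2 (rem[i]'hi).1 (rem[i]'hi).2 + pvCost (rem[i]'hi) p := by omega
        _ = pvCost pos ((rem[i]'hi) :: p) := rfl

lemma pvFoldNone (l : List Int) (x : Int) :
    (x :: l).foldl (fun (acc : Option Int) t => match acc with
      | none => some t
      | some m' => if t < m' then some t else some m') none = some (l.foldl min x) := by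
  rw [List.foldl_cons]
  exact pvFoldSome l x

theorem find_min_delivery_time_spec : Claim_equal_find_min_delivery_time := by
  intro N K houses _ hpre
  obtain ⟨hK0, hKlen⟩ := hpre
  have hk : K.toNat ≤ houses.length := by omega
  have hmain := pvMain K.toNat houses (1, 1) hk
  simp only [Spec_find_min_delivery_time, find_min_delivery_time, find_min_delivery_time_alt]
  have hbody : (fun (min_time : Option Int) (perm : List (Int × Int)) =>
      let z := perm.foldl (fun (s : Int × (Int × Int)) house =>
          (s.1 + calculate_distance s.2.1 s.2.2 house.1 house.2, house)) ((0 : Int), ((1 : Int), (1 : Int)))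
      let time := z.1 + calculate_distance z.2.1 z.2.2 1 1
      match min_time with
      | none => some time
      | some m => if time < m then some time else some m)
      = (fun (acc : Option Int) (perm : List (Int × Int)) =>
          (fun (acc : Option Int) (t : Int) => match acc with
            | none => some t
            | some m => if t < m then some t else some m) acc (pvCost (1, 1) perm)) := by
    funext acc perm
    simp only
    rw [pvInner perm 0 (1, 1), zero_add]
  rw [hbody]
  have hfold := List.foldl_map (f := pvCost (1, 1))
      (g := fun (acc : Option Int) (t : Int) => match acc with
        | none => some t
        | some m => if t < m then some t else some m)
      (l := PySem.List.permutations houses K.toNat) (init := (none : Option Int))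
  rw [← hfold]
  rcases hcosts : (PySem.List.permutations houses K.toNat).map (pvCost (1, 1)) with _ | ⟨c0, ct⟩
  · rw [hcosts] at hmain
    have hnone : PySem.List.min? ([] : List Int) (fun v => v) = none :=
      (PySem.List.min?_eq_none_iff _ _).2 rfl
    rw [hnone] at hmain
    exact absurd hmain (by simp)
  · rw [hcosts] at hmain
    rw [PySem.List.min?_id_cons] at hmain
    rw [pvFoldNone]
    rw [Option.some_inj.1 hmain]
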